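-- pv_equiv track=rewrite | github.com/yanez-compliance/MIID-subnet | MIID/miner/address_service.py | looks_like_address
-- ===== SOURCE A (Python) =====
-- def looks_like_address(s: str) -> bool:
--     if not s: return False
--     s = s.strip()
--     if len(s) < 10 or len(s) > 240: return False
--     if not any(ch.isalpha() for ch in s): return False
--     if not any(ch.isdigit() for ch in s): return False
--     if len(set(s.lower())) < 5: return False
--     return True
-- ===== SOURCE B (Python) =====
-- def looks_like_address(s: str) -> bool:
--     if not s:
--         return False
--     s = s.strip()
--     if len(s) < 10 or len(s) > 240:
--         return False
--     chars = sorted(s.lower())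
--     prev = chars[0]
--     distinct = 1
--     has_alpha = prev.isalpha()
--     has_digit = prev.isdigit()
--     for ch in chars[1:]:
--         if ch != prev:
--             distinct += 1
--             prev = ch
--             has_alpha = has_alpha or ch.isalpha()
--             has_digit = has_digit or ch.isdigit()
--     return has_alpha and has_digit and distinct >= 5
-- ===== Notes on version B (the rewrite author's own statement) =====
-- stated objective: alternative
-- what changed: Instead of A's three independent scans with a hash set, B sorts the lowered characters and makes one adjacent-difference scan over the sorted run: distinct characters are counted as run boundaries and the alpha/digit flags are evaluated only on the first element of each run (correct since equal characters share the class), with no set data structure at all.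
import Mathlib
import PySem

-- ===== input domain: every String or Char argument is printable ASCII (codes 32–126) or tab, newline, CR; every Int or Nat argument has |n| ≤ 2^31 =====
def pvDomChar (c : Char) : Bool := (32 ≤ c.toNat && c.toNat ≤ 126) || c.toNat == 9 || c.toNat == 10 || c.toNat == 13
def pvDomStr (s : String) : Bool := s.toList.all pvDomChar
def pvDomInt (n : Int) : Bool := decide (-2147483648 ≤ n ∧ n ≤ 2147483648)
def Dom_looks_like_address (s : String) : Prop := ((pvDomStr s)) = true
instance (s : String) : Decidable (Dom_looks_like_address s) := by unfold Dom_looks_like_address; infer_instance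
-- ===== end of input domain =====

-- B replaces A's three separate scans and hash set by sort-then-scan: it sorts the lowered
-- characters and counts run boundaries for the distinct count, testing alpha/digit only on
-- the first element of each run (alternative algorithm, no set structure; not faster).

-- ===== PORT A =====
def looks_like_address (s : String) : Bool :=
  if s.toList.isEmpty then false
  else
    let t := PySem.Chars.strip s.toList
    if t.length < 10 || 240 < t.length then false
    else if !(t.any PySem.Chars.isalpha) then false
    else if !(t.any PySem.Chars.isdigit) then false
    else if (PySem.Set.ofList (PySem.Chars.lower t)).length < 5 then false
    else true

-- ===== PORT B =====
-- state of Source B's loop: (distinct, has_alpha, has_digit, prev)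
def looks_like_address_alt (s : String) : Bool :=
  if s.toList.isEmpty then false
  else
    let t := PySem.Chars.strip s.toList
    if t.length < 10 || 240 < t.length then false
    else
      match PySem.List.sorted (PySem.Chars.lower t) (fun c => c) false with
      | [] => false  -- unreachable: t.length ≥ 10, and lowering/sorting preserve length
      | c :: rest =>
          let st := rest.foldl
            (fun (acc : Nat × Bool × Bool × Char) ch =>
              if ch ≠ acc.2.2.2 then
                (acc.1 + 1, acc.2.1 || PySem.Chars.isalpha ch,
                 acc.2.2.1 || PySem.Chars.isdigit ch, ch)
              else acc)
            (1, PySem.Chars.isalpha c, PySem.Chars.isdigit c, c)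
          st.2.1 && st.2.2.1 && decide (5 ≤ st.1)

-- ===== PRECONDITION & SPEC =====
def Spec_looks_like_address (s : String) (out : Bool) : Prop := out = looks_like_address_alt s
instance (s : String) (out : Bool) : Decidable (Spec_looks_like_address s out) := by unfold Spec_looks_like_address; infer_instance

-- ===== CLAIM (what is proved, stated in full; the proofs are below) =====
def Claim_equal_looks_like_address : Prop := ∀ (s : String), Dom_looks_like_address s → Spec_looks_like_address s (looks_like_address s)

-- ===== LEMMAS AND PROOFS =====

lemma char_le_iff (a b : Char) : a ≤ b ↔ a.toNat ≤ b.toNat := Char.le_def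

lemma toNat_ofNat_add32 (c : Char) (h1 : 65 ≤ c.toNat) (h2 : c.toNat ≤ 90) :
    (Char.ofNat (c.toNat + 32)).toNat = c.toNat + 32 := by
  rw [Char.toNat_ofNat, if_pos]
  unfold Nat.isValidChar
  left; omega

-- ASCII lowering does not change the character class tested by isalpha
lemma isalpha_lowerChar (c : Char) :
    PySem.Chars.isalpha (PySem.Chars.lowerChar c) = PySem.Chars.isalpha c := by
  simp only [PySem.Chars.isalpha, PySem.Chars.lowerChar, PySem.Chars.isupper, PySem.Chars.islower]
  split_ifs with h
  · simp only [Bool.and_eq_true, decide_eq_true_eq, char_le_iff] at h ⊢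
    have hA : 'A'.toNat = 65 := rfl
    have hZ : 'Z'.toNat = 90 := rfl
    rw [hA, hZ] at h
    have ht := toNat_ofNat_add32 c h.1 h.2
    rw [Bool.eq_iff_iff]
    simp only [Bool.or_eq_true, Bool.and_eq_true, decide_eq_true_eq, ht]
    have ha : 'a'.toNat = 97 := rfl
    have hz : 'z'.toNat = 122 := rfl
    rw [hA, hZ, ha, hz]
    omega
  · rfl

-- and neither the class tested by isdigit
lemma isdigit_lowerChar (c : Char) :
    PySem.Chars.isdigit (PySem.Chars.lowerChar c) = PySem.Chars.isdigit c := by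
  simp only [PySem.Chars.isdigit, PySem.Chars.lowerChar, PySem.Chars.isupper]
  split_ifs with h
  · simp only [Bool.and_eq_true, decide_eq_true_eq, char_le_iff] at h ⊢
    have hA : 'A'.toNat = 65 := rfl
    have hZ : 'Z'.toNat = 90 := rfl
    rw [hA, hZ] at h
    have ht := toNat_ofNat_add32 c h.1 h.2
    rw [Bool.eq_iff_iff]
    simp only [Bool.and_eq_true, decide_eq_true_eq, ht]
    have h0 : '0'.toNat = 48 := rfl
    have h9 : '9'.toNat = 57 := rfl
    rw [h0, h9]
    omega
  · rfl

-- dedup of a tail whose elements all lie at or above p, with p removed,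
-- has as many elements as the dedup of the part strictly above p
lemma discard_len_eq (p : Char) (ys : List Char) (h : ∀ x ∈ ys, p ≤ x) :
    (PySem.Set.discard (PySem.Set.ofList ys) p).length
      = (PySem.Set.ofList (ys.filter (fun x => decide (p < x)))).length := by
  apply List.Perm.length_eq
  rw [List.perm_ext_iff_of_nodup (PySem.Set.nodup_discard _ p (PySem.Set.nodup_ofList ys))
      (PySem.Set.nodup_ofList _)]
  intro x
  rw [PySem.Set.mem_discard, PySem.Set.mem_ofList, PySem.Set.mem_ofList, List.mem_filter]
  constructor
  · rintro ⟨hx, hne⟩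
    exact ⟨hx, by simp only [decide_eq_true_eq]; exact lt_of_le_of_ne (h x hx) (Ne.symm hne)⟩
  · rintro ⟨hx, hlt⟩
    simp only [decide_eq_true_eq] at hlt
    exact ⟨hx, fun he => absurd he (by intro he; subst he; exact lt_irrefl x hlt)⟩

-- what Source B's loop computes from state (n, ha, hd, p) over a tail that is sorted
-- and bounded below by p, when ha/hd already account for p
lemma scan_spec (rest : List Char) (n : Nat) (ha hd : Bool) (p : Char)
    (hpa : PySem.Chars.isalpha p = true → ha = true)
    (hpd : PySem.Chars.isdigit p = true → hd = true)
    (hle : ∀ x ∈ rest, p ≤ x) (hpw : rest.Pairwise (· ≤ ·)) :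
    rest.foldl
      (fun (acc : Nat × Bool × Bool × Char) ch =>
        if ch ≠ acc.2.2.2 then
          (acc.1 + 1, acc.2.1 || PySem.Chars.isalpha ch,
           acc.2.2.1 || PySem.Chars.isdigit ch, ch)
        else acc)
      (n, ha, hd, p)
    = (n + (PySem.Set.ofList (rest.filter (fun x => decide (p < x)))).length,
       ha || rest.any PySem.Chars.isalpha,
       hd || rest.any PySem.Chars.isdigit,
       rest.getLastD p) := by
  induction rest generalizing n ha hd p with
  | nil => simp
  | cons ch rest' ih =>
      have hple : p ≤ ch := hle ch (List.mem_cons_self)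
      have hle' : ∀ x ∈ rest', ch ≤ x := fun x hx => (List.pairwise_cons.mp hpw).1 x hx
      have hpw' : rest'.Pairwise (· ≤ ·) := (List.pairwise_cons.mp hpw).2
      rw [List.foldl_cons]
      by_cases hch : ch = p
      · subst hch
        rw [if_neg (show ¬(ch ≠ (n, ha, hd, ch).2.2.2) from not_not_intro rfl)]
        rw [ih n ha hd ch hpa hpd hle' hpw']
        have hfilt : (ch :: rest').filter (fun x => decide (ch < x))
            = rest'.filter (fun x => decide (ch < x)) := by
          rw [List.filter_cons, if_neg (by simp)]
        rw [hfilt]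
        simp only [List.any_cons, List.getLastD_cons]
        cases hA : PySem.Chars.isalpha ch
        · cases hD : PySem.Chars.isdigit ch
          · simp
          · rw [hpd hD]; simp
        · rw [hpa hA]
          cases hD : PySem.Chars.isdigit ch
          · simp
          · rw [hpd hD]; simp
      · have hplt : p < ch := lt_of_le_of_ne hple (fun he => hch he.symm)
        rw [if_pos (show ch ≠ (n, ha, hd, p).2.2.2 from hch)]
        rw [ih (n + 1) (ha || PySem.Chars.isalpha ch) (hd || PySem.Chars.isdigit ch) ch
            (by intro h; rw [h]; simp) (by intro h; rw [h]; simp) hle' hpw']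
        have hfilt : (ch :: rest').filter (fun x => decide (p < x))
            = ch :: rest'.filter (fun x => decide (p < x)) := by
          rw [List.filter_cons, if_pos (by simp [hplt])]
        have hlen : (PySem.Set.ofList ((ch :: rest').filter (fun x => decide (p < x)))).length
            = 1 + (PySem.Set.ofList (rest'.filter (fun x => decide (ch < x)))).length := by
          rw [hfilt, PySem.Set.ofList_cons, List.length_cons]
          have hmem : ∀ x ∈ rest'.filter (fun y => decide (p < y)), ch ≤ x := by
            intro x hx
            exact hle' x (List.mem_of_mem_filter hx)
          rw [discard_len_eq ch _ hmem]
          have : (rest'.filter (fun y => decide (p < y))).filter (fun x => decide (ch < x))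
              = rest'.filter (fun x => decide (ch < x)) := by
            rw [List.filter_filter]
            apply List.filter_congr
            intro x hx
            rw [Bool.eq_iff_iff]
            simp only [Bool.and_eq_true, decide_eq_true_eq]
            exact ⟨fun h => h.1, fun h => ⟨h, lt_trans hplt h⟩⟩
          rw [this]
          omega
        rw [hlen]
        simp only [List.any_cons, List.getLastD_cons]
        refine Prod.ext (by omega) (Prod.ext ?_ (Prod.ext ?_ rfl)) <;>
          simp [Bool.or_assoc]

-- permuted lists have dedups of the same size
lemma ofList_length_eq_of_perm (xs ys : List Char) (hp : xs.Perm ys) :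
    (PySem.Set.ofList xs).length = (PySem.Set.ofList ys).length := by
  apply List.Perm.length_eq
  rw [List.perm_ext_iff_of_nodup (PySem.Set.nodup_ofList xs) (PySem.Set.nodup_ofList ys)]
  intro x
  rw [PySem.Set.mem_ofList, PySem.Set.mem_ofList]
  exact ⟨fun h => hp.mem_iff.mp h, fun h => hp.mem_iff.mpr h⟩

theorem looks_like_address_spec : Claim_equal_looks_like_address := by
  intro s _
  unfold Spec_looks_like_address looks_like_address looks_like_address_alt
  by_cases h0 : s.toList.isEmpty
  · simp [h0]
  · simp only [h0]
    set t := PySem.Chars.strip s.toList with ht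
    by_cases hlen : t.length < 10 || 240 < t.length
    · simp [hlen]
    · simp only [hlen]
      -- the sorted lowered list is nonempty
      have hlen10 : 10 ≤ t.length := by
        simp only [Bool.or_eq_true, decide_eq_true_eq, not_or] at hlen
        omega
      set L := PySem.Chars.lower t with hL
      have hLlen : L.length = t.length := by
        rw [hL]; simp [PySem.Chars.lower]
      have hperm := PySem.List.sorted_perm (xs := L) (key := fun c => c) (rev := false)
      cases hsort : PySem.List.sorted L (fun c => c) false with
      | nil =>
          exfalso
          rw [hsort] at hperm
          have := hperm.length_eq
          simp at this
          omega
      | cons c rest =>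
          rw [hsort] at hperm
          have hpw : (c :: rest).Pairwise (· ≤ ·) := by
            have := PySem.List.sorted_pairwise (xs := L) (key := fun c => c)
            rw [hsort] at this
            exact this
          have hle : ∀ x ∈ rest, c ≤ x := fun x hx => (List.pairwise_cons.mp hpw).1 x hx
          dsimp only
          rw [scan_spec rest 1 (PySem.Chars.isalpha c) (PySem.Chars.isdigit c) c
              (fun h => h) (fun h => h) hle (List.pairwise_cons.mp hpw).2]
          -- any over t equals any over the sorted lowered list
          have hanyA : t.any PySem.Chars.isalpha
              = (PySem.Chars.isalpha c || rest.any PySem.Chars.isalpha) := by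
            rw [← List.any_cons, hperm.any_eq, hL, PySem.Chars.lower, List.any_map]
            exact List.any_congr rfl (fun a => (isalpha_lowerChar a).symm)
          have hanyD : t.any PySem.Chars.isdigit
              = (PySem.Chars.isdigit c || rest.any PySem.Chars.isdigit) := by
            rw [← List.any_cons, hperm.any_eq, hL, PySem.Chars.lower, List.any_map]
            exact List.any_congr rfl (fun a => (isdigit_lowerChar a).symm)
          -- the distinct count equals |set(L)|
          have hcount : (PySem.Set.ofList L).length
              = 1 + (PySem.Set.ofList (rest.filter (fun x => decide (c < x)))).length := by
            rw [ofList_length_eq_of_perm L (c :: rest) hperm.symm]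
            rw [PySem.Set.ofList_cons, List.length_cons]
            rw [discard_len_eq c rest hle]
            omega
          rw [hcount, hanyA, hanyD]
          cases hA : PySem.Chars.isalpha c || rest.any PySem.Chars.isalpha <;>
            cases hD : PySem.Chars.isdigit c || rest.any PySem.Chars.isdigit <;>
            by_cases h5 : 1 + List.length
                (PySem.Set.ofList (List.filter (fun x => decide (c < x)) rest)) < 5 <;>
            simp [h5] <;> omega
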